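-- pv_equiv track=rewrite | github.com/LokiGadd/Python | 22.py | least_larger
-- ===== SOURCE A (Python) =====
-- def least_larger(a, i):
--     if max(a) == a[i]:
--         return -1
--     else:
--         temp = a[i]
--         b = a[:]
--         b.sort()
--         for i in b:
--             if i > temp:
--                 break
--         return a.index(i)
-- ===== SOURCE B (Python) =====
-- def least_larger(a, i):
--     # linear pass: collect the values greater than a[i], take their minimum (no sort)
--     t = a[i]
--     c = [x for x in a if x > t]
--     return -1 if not c else a.index(min(c))
-- ===== Notes on version B (the rewrite author's own statement) =====
-- stated objective: alternative
-- what changed: B drops the copy-and-sort plus scan of the sorted list: it filters the values greater than a[i] in one linear pass and takes their minimum, then a.index; the -1 case falls out naturally when the filter is empty.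
import Mathlib
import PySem

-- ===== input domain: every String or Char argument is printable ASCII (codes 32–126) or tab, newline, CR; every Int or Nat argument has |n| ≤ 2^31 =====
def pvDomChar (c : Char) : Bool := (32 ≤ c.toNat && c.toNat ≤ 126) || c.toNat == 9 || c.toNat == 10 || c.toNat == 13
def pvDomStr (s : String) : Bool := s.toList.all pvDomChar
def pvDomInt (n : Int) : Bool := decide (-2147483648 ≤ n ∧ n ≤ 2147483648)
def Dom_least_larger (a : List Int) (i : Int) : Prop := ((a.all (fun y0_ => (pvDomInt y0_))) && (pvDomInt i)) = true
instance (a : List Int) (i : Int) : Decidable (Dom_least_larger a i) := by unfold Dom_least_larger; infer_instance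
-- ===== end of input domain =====

-- B replaces A's copy-and-sort + scan of the sorted list with a filter of the values greater than a[i] followed by their minimum (no sort).

-- ===== PORT A =====
-- 'for i in b: if i > temp: break' — loop variable i is reused; carries the last value seen
def llLoop (t : Int) : List Int → Int → Int
  | [], cur => cur
  | x :: xs, _ => if t < x then x else llLoop t xs x

def least_larger (a : List Int) (i : Int) : Int :=
  match PySem.List.max? a (fun y => y), PySem.List.pyGet? a i with
  | some m, some ai =>
    if m = ai then -1
    else
      let temp := ai
      let b := PySem.List.sorted a (fun y => y) false
      let v := llLoop temp b i
      match PySem.List.index? a v with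
      | some k => (k : Int)
      | none => 0
  | _, _ => 0

-- ===== PORT B =====
def least_larger_alt (a : List Int) (i : Int) : Int :=
  match PySem.List.pyGet? a i with
  | none => 0
  | some t =>
    let c := a.filter (fun x => decide (t < x))
    match PySem.List.min? c (fun y => y) with
    | none => -1
    | some v =>
      match PySem.List.index? a v with
      | some k => (k : Int)
      | none => 0

-- ===== PRECONDITION & SPEC =====
-- Pre_ excludes exactly the inputs where A raises: empty a (max) or index i out of range (IndexError)
def Pre_least_larger (a : List Int) (i : Int) : Prop := PySem.Raise.InRange a.length i
instance (a : List Int) (i : Int) : Decidable (Pre_least_larger a i) := by unfold Pre_least_larger; infer_instance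
def pvWitness_least_larger : List Int × Int := ([3, 1, 4, 1], 1)

def Spec_least_larger (a : List Int) (i : Int) (out : Int) : Prop := out = least_larger_alt a i
instance (a : List Int) (i : Int) (out : Int) : Decidable (Spec_least_larger a i out) := by unfold Spec_least_larger; infer_instance

-- ===== CLAIM (what is proved, stated in full; the proofs are below) =====
def Claim_equal_least_larger : Prop := ∀ (a : List Int) (i : Int), Dom_least_larger a i → Pre_least_larger a i → Spec_least_larger a i (least_larger a i)

-- ===== LEMMAS AND PROOFS =====

-- option-valued minimum combinator and list minimum
def omin : Option Int → Option Int → Option Int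
  | none, o => o
  | some a, none => some a
  | some a, some b => some (min a b)

def minO : List Int → Option Int
  | [] => none
  | x :: xs => omin (some x) (minO xs)

theorem omin_none_right (o : Option Int) : omin o none = o := by cases o <;> rfl

theorem omin_assoc (o₁ o₂ o₃ : Option Int) : omin (omin o₁ o₂) o₃ = omin o₁ (omin o₂ o₃) := by
  cases o₁ <;> cases o₂ <;> cases o₃ <;> simp [omin, min_assoc]

theorem omin_some_comm (x y : Int) (o : Option Int) :
    omin (some x) (omin (some y) o) = omin (some y) (omin (some x) o) := by
  cases o <;> simp [omin, min_left_comm, min_comm]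

theorem minO_mem {l : List Int} {m : Int} (h : minO l = some m) : m ∈ l := by
  induction l with
  | nil => simp [minO] at h
  | cons x xs ih =>
    simp only [minO] at h
    cases hx : minO xs with
    | none =>
      rw [hx, omin_none_right] at h
      simp at h
      simp [h]
    | some y =>
      rw [hx] at h
      simp [omin] at h
      rcases min_cases x y with ⟨he, _⟩ | ⟨he, _⟩
      · have hm : m = x := by rw [← h, he]
        rw [hm]; exact List.mem_cons_self
      · have hm : m = y := by rw [← h, he]
        subst hm
        exact List.mem_cons_of_mem x (ih hx)

theorem minO_perm {l₁ l₂ : List Int} (h : l₁.Perm l₂) : minO l₁ = minO l₂ := by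
  induction h with
  | nil => rfl
  | cons x _ ih => simp [minO, ih]
  | swap x y l => simp [minO, omin_some_comm]
  | trans _ _ ih₁ ih₂ => rw [ih₁, ih₂]

-- Python's min over a list is minO
theorem foldl_min_eq_minO (t : List Int) : ∀ x : Int, some (t.foldl min x) = minO (x :: t) := by
  induction t with
  | nil => intro x; simp [minO, omin]
  | cons y t ih =>
    intro x
    rw [List.foldl_cons, ih (min x y)]
    show minO (min x y :: t) = minO (x :: y :: t)
    simp only [minO, ← omin_assoc]
    cases minO t <;> simp [omin, min_assoc]

theorem min?_eq_minO (l : List Int) : PySem.List.min? l (fun y => y) = minO l := by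
  cases l with
  | nil => simp [minO, PySem.List.min?_eq_none_iff]
  | cons x t => rw [PySem.List.min?_id_cons, foldl_min_eq_minO]

-- A's scan of the sorted list finds the minimum of the elements greater than t
theorem loopA_eq (t : Int) : ∀ (l : List Int) (cur : Int),
    l.Pairwise (fun a b => a ≤ b) →
    l.filter (fun x => decide (t < x)) ≠ [] →
    minO (l.filter (fun x => decide (t < x))) = some (llLoop t l cur) := by
  intro l
  induction l with
  | nil => intro cur _ hne; simp at hne
  | cons x xs ih =>
    intro cur hp hne
    by_cases hx : t < x
    · simp only [List.filter_cons, hx, decide_true, if_pos, minO, llLoop]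
      cases hm : minO (xs.filter (fun x => decide (t < x))) with
      | none => simp [omin_none_right]
      | some m =>
        have hmem : m ∈ xs := (List.mem_filter.mp (minO_mem hm)).1
        have hle : x ≤ m := (List.pairwise_cons.mp hp).1 m hmem
        simp [omin, min_eq_left hle]
    · simp only [List.filter_cons, hx, decide_false, if_neg, Bool.false_eq_true,
        not_false_iff] at hne ⊢
      rw [llLoop]
      simp only [if_neg hx]
      exact ih x (List.pairwise_cons.mp hp).2 hne

theorem least_larger_spec_aux (a : List Int) (i : Int)
    (hpre : PySem.Raise.InRange a.length i) :
    least_larger a i = least_larger_alt a i := by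
  have hget : ∃ t, PySem.List.pyGet? a i = some t := by
    cases h : PySem.List.pyGet? a i with
    | none => exact absurd hpre ((PySem.List.pyGet?_eq_none_iff _ _).mp h)
    | some t => exact ⟨t, rfl⟩
  obtain ⟨t, ht⟩ := hget
  have hta : t ∈ a := PySem.List.mem_of_pyGet?_eq_some _ ht
  have hne : a ≠ [] := by intro h; subst h; simp at hta
  have hmax : ∃ m, PySem.List.max? a (fun y => y) = some m := by
    cases h : PySem.List.max? a (fun y => y) with
    | none => exact absurd ((PySem.List.max?_eq_none_iff _ _).mp h) hne
    | some m => exact ⟨m, rfl⟩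
  obtain ⟨m, hm⟩ := hmax
  have hmmax : ∀ y ∈ a, y ≤ m := PySem.List.max?_isMax hm
  simp only [least_larger, least_larger_alt, hm, ht]
  rw [min?_eq_minO]
  by_cases hmt : m = t
  · -- no element exceeds t: the filter is empty, both return -1
    have hfil : a.filter (fun x => decide (t < x)) = [] := by
      apply List.filter_eq_nil_iff.mpr
      intro x hxa
      simp only [decide_eq_true_eq]
      have := hmmax x hxa
      omega
    rw [if_pos hmt, hfil]
    simp [minO]
  · rw [if_neg hmt]
    have hmm : m ∈ a := PySem.List.max?_mem hm
    have htm : t < m := lt_of_le_of_ne (hmmax t hta) (fun h => hmt h.symm)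
    have hperm : (PySem.List.sorted a (fun y => y) false).Perm a :=
      PySem.List.sorted_perm a (fun y => y) false
    have hfperm : ((PySem.List.sorted a (fun y => y) false).filter
        (fun x => decide (t < x))).Perm (a.filter (fun x => decide (t < x))) :=
      hperm.filter _
    have hfne : a.filter (fun x => decide (t < x)) ≠ [] := by
      intro h
      have : m ∈ a.filter (fun x => decide (t < x)) := by
        simp [List.mem_filter, hmm, htm]
      rw [h] at this; simp at this
    have hsfne : (PySem.List.sorted a (fun y => y) false).filter
        (fun x => decide (t < x)) ≠ [] := by
      intro h
      rw [h] at hfperm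
      exact hfne hfperm.symm.eq_nil
    have hpair : (PySem.List.sorted a (fun y => y) false).Pairwise
        (fun a b => a ≤ b) := PySem.List.sorted_pairwise a (fun y => y)
    have hloop := loopA_eq t (PySem.List.sorted a (fun y => y) false) i hpair hsfne
    rw [minO_perm hfperm] at hloop
    rw [hloop]

-- ===== VERDICT (by name: the statement is the Claim_ definition above) =====
theorem least_larger_spec : Claim_equal_least_larger := by
  intro a i _ hpre
  exact least_larger_spec_aux a i hpre
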